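-- pv_equiv track=rewrite | github.com/Georgakopoulos-Soares-lab/dna-quasi-primes | quasi-primes-scripts/quasi_primes_counting.py | encode_kmer
-- ===== SOURCE A (Python) =====
-- def encode_kmer(kmer):
--     """ Encodes a Kmer string into a 32-bit integer representation. """
--     encoded_kmer = 0
--     for nucleotide in kmer:
--         encoded_kmer <<= 2
--         if nucleotide == 'C':
--             encoded_kmer |= 1
--         elif nucleotide == 'G':
--             encoded_kmer |= 2
--         elif nucleotide == 'T':
--             encoded_kmer |= 3
--     return encoded_kmer
-- ===== SOURCE B (Python) =====
-- _CODES = {'C': '01', 'G': '10', 'T': '11'}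
--
-- def encode_kmer(kmer):
--     """ Encodes a Kmer string into a 32-bit integer representation. """
--     bits = ''.join(_CODES.get(n, '00') for n in kmer)
--     if not bits:
--         return 0
--     return int(bits, 2)
-- ===== Notes on version B (the rewrite author's own statement) =====
-- stated objective: alternative
-- what changed: Replaces the per-character shift-and-OR accumulation with a table mapping each nucleotide to a 2-bit code string, joining the codes and doing a single base-2 parse (with an empty-string guard).
import Mathlib
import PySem

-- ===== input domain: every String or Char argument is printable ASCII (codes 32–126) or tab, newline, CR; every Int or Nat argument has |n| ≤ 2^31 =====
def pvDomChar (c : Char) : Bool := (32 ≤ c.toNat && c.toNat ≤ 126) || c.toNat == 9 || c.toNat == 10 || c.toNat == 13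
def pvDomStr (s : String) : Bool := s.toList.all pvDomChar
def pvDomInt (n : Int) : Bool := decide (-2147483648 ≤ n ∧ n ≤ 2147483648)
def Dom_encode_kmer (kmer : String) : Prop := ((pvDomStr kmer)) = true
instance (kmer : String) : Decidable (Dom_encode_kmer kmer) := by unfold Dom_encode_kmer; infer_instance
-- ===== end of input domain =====

-- B replaces A's per-character shift-and-OR accumulation with a dict of 2-bit code
-- strings, one join, and a single base-2 parse (alternative decomposition, same cost).


-- ===== PORT A =====
-- '<<= 2' is '* 4' and '|= k' (k < 4, after the shift) is '+ k': exact, the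
-- accumulator is always nonnegative with its two low bits clear at the '|='.
def encode_kmer (kmer : String) : Int :=
  kmer.toList.foldl
    (fun encoded_kmer nucleotide =>
      let encoded_kmer := encoded_kmer * 4
      if nucleotide = 'C' then encoded_kmer + 1
      else if nucleotide = 'G' then encoded_kmer + 2
      else if nucleotide = 'T' then encoded_kmer + 3
      else encoded_kmer) 0

-- ===== PORT B =====
def pvCodes : PySem.Dict Char String :=
  PySem.Dict.ofList [('C', "01"), ('G', "10"), ('T', "11")]

-- 'int(bits, 2)' is ported by hand as a base-2 digit fold: exact here since
-- 'bits' consists only of the characters '0' and '1'.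
def encode_kmer_alt (kmer : String) : Int :=
  let bits : String := String.join (kmer.toList.map (fun n => pvCodes.getD n "00"))
  if bits = "" then 0
  else bits.toList.foldl (fun acc c => acc * 2 + (if c = '1' then 1 else 0)) 0

-- ===== PRECONDITION & SPEC =====
def Spec_encode_kmer (kmer : String) (out : Int) : Prop := out = encode_kmer_alt kmer
instance (kmer : String) (out : Int) : Decidable (Spec_encode_kmer kmer out) := by unfold Spec_encode_kmer; infer_instance

-- ===== CLAIM (what is proved, stated in full; the proofs are below) =====
def Claim_equal_encode_kmer : Prop := ∀ (kmer : String), Dom_encode_kmer kmer → Spec_encode_kmer kmer (encode_kmer kmer)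

-- ===== LEMMAS AND PROOFS =====

theorem pvCode_eq (c : Char) :
    pvCodes.getD c "00" =
      if c = 'C' then "01" else if c = 'G' then "10" else if c = 'T' then "11" else "00" := by
  have h : pvCodes = ((PySem.Dict.empty.insert 'C' "01").insert 'G' "10").insert 'T' "11" := by
    decide
  rw [h]
  simp only [PySem.Dict.getD_insert, PySem.Dict.getD_empty]
  split_ifs <;> simp_all

theorem pv_foldl_append (L : List String) (s : String) :
    (L.foldl (fun r t => r ++ t) s).toList = s.toList ++ L.flatMap String.toList := by
  induction L generalizing s with
  | nil => simp
  | cons t L ih => simp [ih, String.toList_append]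

theorem pv_toList_join (L : List String) :
    (String.join L).toList = L.flatMap String.toList := by
  show (L.foldl (fun r t => r ++ t) "").toList = _
  rw [pv_foldl_append]; rfl

theorem pv_parse_code (acc : Int) (c : Char) :
    (pvCodes.getD c "00").toList.foldl (fun acc c => acc * 2 + (if c = '1' then 1 else 0)) acc =
      (let e := acc * 4;
       if c = 'C' then e + 1 else if c = 'G' then e + 2 else if c = 'T' then e + 3 else e) := by
  rw [pvCode_eq]
  split_ifs <;> simp [List.foldl] <;> ring

theorem pv_main (l : List Char) (acc : Int) :
    ((l.map (fun n => pvCodes.getD n "00")).flatMap String.toList).foldl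
        (fun acc c => acc * 2 + (if c = '1' then 1 else 0)) acc =
      l.foldl
        (fun encoded_kmer nucleotide =>
          let encoded_kmer := encoded_kmer * 4
          if nucleotide = 'C' then encoded_kmer + 1
          else if nucleotide = 'G' then encoded_kmer + 2
          else if nucleotide = 'T' then encoded_kmer + 3
          else encoded_kmer) acc := by
  induction l generalizing acc with
  | nil => rfl
  | cons c l ih =>
      simp only [List.map_cons, List.flatMap_cons, List.foldl_append, List.foldl_cons]
      rw [pv_parse_code]
      exact ih _

theorem pv_alt_eq (kmer : String) :
    encode_kmer_alt kmer =
      ((kmer.toList.map (fun n => pvCodes.getD n "00")).flatMap String.toList).foldl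
        (fun acc c => acc * 2 + (if c = '1' then 1 else 0)) 0 := by
  unfold encode_kmer_alt
  show (if String.join (kmer.toList.map (fun n => pvCodes.getD n "00")) = "" then (0 : Int)
        else (String.join (kmer.toList.map (fun n => pvCodes.getD n "00"))).toList.foldl
          (fun acc c => acc * 2 + (if c = '1' then 1 else 0)) 0) = _
  split_ifs with h
  · have : ((kmer.toList.map (fun n => pvCodes.getD n "00")).flatMap String.toList) = [] := by
      rw [← pv_toList_join, h]; rfl
    rw [this]; rfl
  · rw [pv_toList_join]

-- ===== VERDICT (by name: the statement is the Claim_ definition above) =====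
theorem encode_kmer_spec : Claim_equal_encode_kmer := by
  intro kmer _
  show encode_kmer kmer = encode_kmer_alt kmer
  rw [pv_alt_eq, pv_main]
  rfl
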